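-- pv_equiv track=rewrite | github.com/AjinkyaGhadge/Code_Revision | Graphs/AdjacencyMatrix.py | BFS
-- ===== SOURCE A (Python) =====
-- def BFS(adj_mat):
--     visited = set()
--     l = list()
--     for i,j in enumerate(adj_mat):
--         if i not in visited:
--                     visited.add(i)
--                     l.append(i)
--         for m,n in enumerate(adj_mat[i]):
--             if n!=0:
--                 if m not in visited:
--                     visited.add(m)
--                     l.append(m)
--
--     return l
-- ===== SOURCE B (Python) =====
-- def BFS(adj_mat):
--     # Pass 1: flat candidate list in row-major appearance order.
--     order = []
--     for i, row in enumerate(adj_mat):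
--         order.append(i)
--         for m, n in enumerate(row):
--             if n != 0:
--                 order.append(m)
--     # Pass 2: deduplicate, keeping first occurrences.
--     seen = set()
--     result = []
--     for v in order:
--         if v not in seen:
--             seen.add(v)
--             result.append(v)
--     return result
-- ===== Notes on version B (the rewrite author's own statement) =====
-- stated objective: alternative
-- what changed: B splits the work into two separate passes: first build a flat candidate list of indices in row-major appearance order, then deduplicate it keeping first occurrences with a seen set, instead of A's single pass that interleaves the visited-set test with generation.
import Mathlib
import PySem

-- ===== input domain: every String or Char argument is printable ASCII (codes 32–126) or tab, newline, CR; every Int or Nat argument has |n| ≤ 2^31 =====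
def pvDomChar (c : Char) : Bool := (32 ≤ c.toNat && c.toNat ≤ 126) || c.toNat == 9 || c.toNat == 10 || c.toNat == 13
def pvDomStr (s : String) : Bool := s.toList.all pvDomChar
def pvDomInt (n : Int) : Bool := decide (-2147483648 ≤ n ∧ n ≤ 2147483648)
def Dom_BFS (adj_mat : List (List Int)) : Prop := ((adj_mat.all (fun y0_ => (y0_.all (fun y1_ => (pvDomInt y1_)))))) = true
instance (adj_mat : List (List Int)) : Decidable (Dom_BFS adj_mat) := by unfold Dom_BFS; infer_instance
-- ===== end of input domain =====

-- B separates "generate candidates in appearance order" from "deduplicate keeping first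
-- occurrence" into two passes, instead of A's single interleaved pass (objective: alternative).

-- ===== PORT A =====
-- single pass: visited set + output list, updated inline while scanning rows
def BFS (adj_mat : List (List Int)) : List Int :=
  let st :=
    (PySem.List.enumerate adj_mat).foldl
      (fun (st : PySem.Set Int × List Int) ij =>
        let st1 := if st.1.contains ij.1 then st else (st.1.add ij.1, st.2 ++ [ij.1])
        (PySem.List.enumerate (PySem.List.pyGetD adj_mat ij.1 [])).foldl
          (fun (st : PySem.Set Int × List Int) mn =>
            if mn.2 ≠ 0 then
              (if st.1.contains mn.1 then st else (st.1.add mn.1, st.2 ++ [mn.1]))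
            else st)
          st1)
      (PySem.Set.empty, [])
  st.2

-- ===== PORT B =====
-- pass 1 of B: flat candidate list in row-major appearance order
def bfsOrder (adj_mat : List (List Int)) : List Int :=
  (PySem.List.enumerate adj_mat).foldl
    (fun (acc : List Int) ij =>
      (PySem.List.enumerate ij.2).foldl
        (fun acc mn => if mn.2 ≠ 0 then acc ++ [mn.1] else acc)
        (acc ++ [ij.1]))
    []

-- pass 2 of B: deduplicate keeping first occurrences (seen set + result list)
def bfsDedup (order : List Int) : List Int :=
  (order.foldl
    (fun (st : PySem.Set Int × List Int) v =>
      if st.1.contains v then st else (st.1.add v, st.2 ++ [v]))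
    (PySem.Set.empty, [])).2

def BFS_alt (adj_mat : List (List Int)) : List Int :=
  bfsDedup (bfsOrder adj_mat)

-- ===== PRECONDITION & SPEC =====
def Spec_BFS (adj_mat : List (List Int)) (out : List Int) : Prop := out = BFS_alt adj_mat
instance (adj_mat : List (List Int)) (out : List Int) : Decidable (Spec_BFS adj_mat out) := by unfold Spec_BFS; infer_instance

-- ===== CLAIM (what is proved, stated in full; the proofs are below) =====
def Claim_equal_BFS : Prop := ∀ (adj_mat : List (List Int)), Dom_BFS adj_mat → Spec_BFS adj_mat (BFS adj_mat)

-- ===== LEMMAS AND PROOFS =====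

-- the dedup step shared by both sides
def dstep (st : PySem.Set Int × List Int) (v : Int) : PySem.Set Int × List Int :=
  if st.1.contains v then st else (st.1.add v, st.2 ++ [v])

-- A's inner loop = dedup-fold over the row's nonzero column indices
theorem inner_eq (row : List Int) : ∀ (s : Int) (st : PySem.Set Int × List Int),
    (PySem.List.enumerate row s).foldl
        (fun st mn => if mn.2 ≠ 0 then dstep st mn.1 else st) st
      = ((PySem.List.enumerate row s).foldl
          (fun acc mn => if mn.2 ≠ 0 then acc ++ [mn.1] else acc) []).foldl dstep st := by
  induction row with
  | nil => intro s st; simp [PySem.List.enumerate]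
  | cons x xs ih =>
    intro s st
    simp only [PySem.List.enumerate_cons, List.foldl_cons]
    by_cases hx : x ≠ 0
    · simp only [if_pos hx, ih]
      rw [PySem.List.foldl_append_ite (p := fun mn => mn.2 ≠ 0) (f := Prod.fst),
          PySem.List.foldl_append_ite (p := fun mn => mn.2 ≠ 0) (f := Prod.fst)]
      simp
    · simp only [if_neg hx, ih]

-- B's order list restricted to a suffix, as the same foldl-generated list
theorem order_decomp (L : List (Int × List Int)) : ∀ (acc : List Int),
    L.foldl
      (fun (acc : List Int) ij =>
        (PySem.List.enumerate ij.2).foldl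
          (fun acc mn => if mn.2 ≠ 0 then acc ++ [mn.1] else acc)
          (acc ++ [ij.1])) acc
    = acc ++ L.foldl
        (fun (acc : List Int) ij =>
          (PySem.List.enumerate ij.2).foldl
            (fun acc mn => if mn.2 ≠ 0 then acc ++ [mn.1] else acc)
            (acc ++ [ij.1])) [] := by
  induction L with
  | nil => intro acc; simp
  | cons p ps ih =>
    intro acc
    simp only [List.foldl_cons]
    rw [ih, PySem.List.foldl_append_ite (p := fun mn => mn.2 ≠ 0) (f := Prod.fst)]
    conv_rhs =>
      rw [ih, PySem.List.foldl_append_ite (p := fun mn => mn.2 ≠ 0) (f := Prod.fst)]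
    simp

-- dedup-fold distributes over append
theorem dedup_append (l₁ l₂ : List Int) (st : PySem.Set Int × List Int) :
    (l₁ ++ l₂).foldl dstep st = l₂.foldl dstep (l₁.foldl dstep st) := by
  simp [List.foldl_append]

-- main invariant: A's nested fold = dedup-fold over B's candidate list
theorem main_inv (adj_mat : List (List Int)) (L : List (Int × List Int))
    (hL : ∀ p ∈ L, PySem.List.pyGetD adj_mat p.1 [] = p.2) :
    ∀ (st : PySem.Set Int × List Int),
    L.foldl
      (fun st ij =>
        (PySem.List.enumerate (PySem.List.pyGetD adj_mat ij.1 [])).foldl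
          (fun st mn => if mn.2 ≠ 0 then dstep st mn.1 else st)
          (dstep st ij.1)) st
    = (L.foldl
        (fun (acc : List Int) ij =>
          (PySem.List.enumerate ij.2).foldl
            (fun acc mn => if mn.2 ≠ 0 then acc ++ [mn.1] else acc)
            (acc ++ [ij.1])) []).foldl dstep st := by
  induction L with
  | nil => intro st; simp
  | cons p ps ih =>
    intro st
    simp only [List.foldl_cons]
    rw [hL p (by simp), inner_eq, order_decomp, dedup_append,
        ih (fun q hq => hL q (by simp [hq]))]
    congr 1
    rw [PySem.List.foldl_append_ite (p := fun mn => mn.2 ≠ 0) (f := Prod.fst),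
        PySem.List.foldl_append_ite (p := fun mn => mn.2 ≠ 0) (f := Prod.fst)]
    simp [dstep]

-- enumerate pairs satisfy the lookup equation
theorem lookup_eq (adj_mat : List (List Int)) :
    ∀ p ∈ PySem.List.enumerate adj_mat 0, PySem.List.pyGetD adj_mat p.1 [] = p.2 := by
  intro p hp
  rcases (PySem.List.mem_enumerate_iff _ _ _).1 hp with ⟨k, hk, rfl⟩
  simp [PySem.List.pyGetD_natCast, List.getElem?_eq_getElem hk]

-- ===== VERDICT (by name: the statement is the Claim_ definition above) =====
theorem BFS_spec : Claim_equal_BFS := by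
  intro adj_mat _
  show BFS adj_mat = BFS_alt adj_mat
  unfold BFS BFS_alt bfsOrder bfsDedup
  simp only []
  have congrA :
      (PySem.List.enumerate adj_mat 0).foldl
        (fun (st : PySem.Set Int × List Int) ij =>
          (PySem.List.enumerate (PySem.List.pyGetD adj_mat ij.1 [])).foldl
            (fun st mn =>
              if mn.2 ≠ 0 then
                (if st.1.contains mn.1 then st else (st.1.add mn.1, st.2 ++ [mn.1]))
              else st)
            (if st.1.contains ij.1 then st else (st.1.add ij.1, st.2 ++ [ij.1])))
        (PySem.Set.empty, [])
      = (PySem.List.enumerate adj_mat 0).foldl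
          (fun st ij =>
            (PySem.List.enumerate (PySem.List.pyGetD adj_mat ij.1 [])).foldl
              (fun st mn => if mn.2 ≠ 0 then dstep st mn.1 else st)
              (dstep st ij.1)) (PySem.Set.empty, []) := by
    simp [dstep]
  rw [congrA, main_inv adj_mat _ (lookup_eq adj_mat)]
  rfl
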